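-- pv_equiv track=rewrite | github.com/viplavdodeja/VIP_Twin | core/twin_service.py | enforce_context_budget
-- ===== SOURCE A (Python) =====
-- def enforce_context_budget(texts, max_chars):
--     if max_chars <= 0:
--         return []
--
--     trimmed = []
--     total = 0
--     i = 0
--     while i < len(texts):
--         t = texts[i]
--         if t is None:
--             t = ""
--         remaining = max_chars - total
--         if remaining <= 0:
--             break
--         if len(t) > remaining:
--             t = t[:remaining]
--         trimmed.append(t)
--         total += len(t)
--         i += 1
--     return trimmed
-- ===== SOURCE B (Python) =====
-- def enforce_context_budget(texts, max_chars):
--     if max_chars <= 0: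
--         return []
--     norm = ["" if t is None else t for t in texts]
--     prefix = [0]
--     for t in norm:
--         prefix.append(prefix[-1] + len(t))
--     # binary search (bisect_left by hand): count of indices i with prefix[i] < max_chars
--     lo, hi = 0, len(norm)
--     while lo < hi:
--         mid = (lo + hi) // 2
--         if prefix[mid] < max_chars:
--             lo = mid + 1
--         else:
--             hi = mid
--     return [norm[i][:max_chars - prefix[i]] for i in range(lo)]
-- ===== Notes on version B (the rewrite author's own statement) =====
-- stated objective: alternative
-- what changed: Replaces the stateful while-loop that accumulates trimmed output and a running total with a prefix-sum array over normalized lengths plus a hand-written bisect_left binary search that finds the emit count, then builds the result as one slice-per-index comprehension.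
import Mathlib
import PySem

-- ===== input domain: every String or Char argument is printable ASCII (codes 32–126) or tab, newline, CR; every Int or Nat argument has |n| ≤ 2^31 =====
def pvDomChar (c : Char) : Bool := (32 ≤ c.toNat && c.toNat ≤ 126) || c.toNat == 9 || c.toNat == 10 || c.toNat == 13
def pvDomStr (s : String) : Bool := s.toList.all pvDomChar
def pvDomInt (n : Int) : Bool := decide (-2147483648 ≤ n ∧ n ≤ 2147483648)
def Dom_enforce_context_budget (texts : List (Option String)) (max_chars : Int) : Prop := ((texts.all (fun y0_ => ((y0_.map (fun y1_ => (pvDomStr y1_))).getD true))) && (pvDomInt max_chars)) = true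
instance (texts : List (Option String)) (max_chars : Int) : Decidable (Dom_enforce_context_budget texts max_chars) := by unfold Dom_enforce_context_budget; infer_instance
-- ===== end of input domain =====

-- B re-implements the greedy trim as prefix sums + a hand-written binary search (bisect_left)
-- over the prefix array; same return value, a different decomposition (objective: alternative).

-- ===== PORT A =====
-- the while loop over i, carrying trimmed/total, as structural recursion on the list suffix
def pvALoop (texts : List (Option String)) (max_chars total : Int) : List String :=
  match texts with
  | [] => []
  | t0 :: rest =>
    let t := t0.getD ""                                  -- if t is None: t = ""
    let remaining := max_chars - total
    if remaining ≤ 0 then []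
    else
      let t' := if PySem.Str.len t > remaining then PySem.Str.slice t none (some remaining) else t
      t' :: pvALoop rest max_chars (total + PySem.Str.len t')

def enforce_context_budget (texts : List (Option String)) (max_chars : Int) : List String :=
  if max_chars ≤ 0 then [] else pvALoop texts max_chars 0

-- ===== PORT B =====
-- prefix.append(prefix[-1] + len(t)) loop, carrying the running last element
def pvBPrefix (acc : Int) : List String → List Int
  | [] => [acc]
  | t :: ts => acc :: pvBPrefix (acc + PySem.Str.len t) ts

-- the hand-written bisect_left while loop; prefix[mid] is always in range (mid < hi ≤ len norm),
-- so List.getD is exact here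
def pvBisect (pre : List Int) (target : Int) (lo hi : Nat) : Nat :=
  if h : lo < hi then
    if pre.getD ((lo + hi) / 2) 0 < target then pvBisect pre target ((lo + hi) / 2 + 1) hi
    else pvBisect pre target lo ((lo + hi) / 2)
  else lo
termination_by hi - lo
decreasing_by all_goals omega

def enforce_context_budget_alt (texts : List (Option String)) (max_chars : Int) : List String :=
  if max_chars ≤ 0 then []
  else
    let norm := texts.map (fun t => t.getD "")
    let pre := pvBPrefix 0 norm
    let lo := pvBisect pre max_chars 0 norm.length
    -- norm[i] with i < lo ≤ len norm is in range, so List.getD is exact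
    (List.range lo).map (fun i =>
      PySem.Str.slice (norm.getD i "") none (some (max_chars - pre.getD i 0)))

-- ===== PRECONDITION & SPEC =====
def Spec_enforce_context_budget (texts : List (Option String)) (max_chars : Int) (out : List String) : Prop := out = enforce_context_budget_alt texts max_chars
instance (texts : List (Option String)) (max_chars : Int) (out : List String) : Decidable (Spec_enforce_context_budget texts max_chars out) := by unfold Spec_enforce_context_budget; infer_instance

-- ===== CLAIM (what is proved, stated in full; the proofs are below) =====
def Claim_equal_enforce_context_budget : Prop := ∀ (texts : List (Option String)) (max_chars : Int), Dom_enforce_context_budget texts max_chars → Spec_enforce_context_budget texts max_chars (enforce_context_budget texts max_chars)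

-- ===== LEMMAS AND PROOFS =====

-- common reference point: the greedy trim as a simple recursion on normalized strings
def pvMid : List String → Int → List String
  | [], _ => []
  | t :: rest, b =>
    if b ≤ 0 then [] else PySem.Str.slice t none (some b) :: pvMid rest (b - PySem.Str.len t)

-- sum of lengths of the first i normalized strings
def pvPresum : List String → Nat → Int
  | _, 0 => 0
  | [], _ + 1 => 0
  | t :: rest, i + 1 => PySem.Str.len t + pvPresum rest i

theorem pvLen_nonneg (t : String) : (0 : Int) ≤ PySem.Str.len t := by
  simp [PySem.Str.len_eq]

theorem pvPresum_nonneg (ts : List String) (i : Nat) : (0 : Int) ≤ pvPresum ts i := by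
  induction ts generalizing i with
  | nil => cases i <;> simp [pvPresum]
  | cons t rest ih =>
    cases i with
    | zero => simp [pvPresum]
    | succ j => have := ih j; have := pvLen_nonneg t; simp [pvPresum]; omega

theorem pvPresum_mono (ts : List String) (i j : Nat) (h : i ≤ j) :
    pvPresum ts i ≤ pvPresum ts j := by
  induction ts generalizing i j with
  | nil => cases i <;> cases j <;> simp [pvPresum]
  | cons t rest ih =>
    cases i with
    | zero =>
      cases j with
      | zero => simp
      | succ j' =>
        have := pvPresum_nonneg rest j'; have := pvLen_nonneg t
        simp [pvPresum]; omega
    | succ i' =>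
      cases j with
      | zero => omega
      | succ j' => have := ih i' j' (by omega); simp [pvPresum]; omega

theorem pvBPrefix_getD (ts : List String) (acc : Int) (i : Nat) (h : i ≤ ts.length) :
    (pvBPrefix acc ts).getD i 0 = acc + pvPresum ts i := by
  induction ts generalizing acc i with
  | nil =>
    have : i = 0 := by simpa using h
    subst this
    simp [pvBPrefix, pvPresum]
  | cons t rest ih =>
    cases i with
    | zero => simp [pvBPrefix, pvPresum]
    | succ j =>
      have hj := ih (acc + PySem.Str.len t) j (by simpa using h)
      simp [pvBPrefix, pvPresum, List.getD] at hj ⊢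
      omega

theorem pvBisect_spec (ts : List String) (target : Int) :
    ∀ fuel lo hi, hi - lo ≤ fuel → lo ≤ hi → hi ≤ ts.length →
    (∀ i, i < lo → pvPresum ts i < target) →
    (∀ i, hi ≤ i → i < ts.length → target ≤ pvPresum ts i) →
    (pvBisect (pvBPrefix 0 ts) target lo hi ≤ ts.length ∧
     (∀ i, i < pvBisect (pvBPrefix 0 ts) target lo hi → pvPresum ts i < target) ∧
     (∀ i, pvBisect (pvBPrefix 0 ts) target lo hi ≤ i → i < ts.length →
        target ≤ pvPresum ts i)) := by
  intro fuel
  induction fuel with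
  | zero =>
    intro lo hi hf hlh hhn hlow hhigh
    have : lo = hi := by omega
    subst this
    rw [pvBisect]
    simp only [lt_irrefl, dite_false]
    exact ⟨by omega, hlow, fun i h1 h2 => hhigh i (by omega) h2⟩
  | succ f ih =>
    intro lo hi hf hlh hhn hlow hhigh
    rw [pvBisect]
    by_cases h : lo < hi
    · simp only [h, dite_true]
      have hmidlt : (lo + hi) / 2 < hi := by omega
      have hmidle : lo ≤ (lo + hi) / 2 := by omega
      have hget : (pvBPrefix 0 ts).getD ((lo + hi) / 2) 0 = pvPresum ts ((lo + hi) / 2) := by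
        have := pvBPrefix_getD ts 0 ((lo + hi) / 2) (by omega)
        omega
      by_cases hc : (pvBPrefix 0 ts).getD ((lo + hi) / 2) 0 < target
      · simp only [hc, if_true]
        refine ih ((lo + hi) / 2 + 1) hi (by omega) (by omega) hhn ?_ hhigh
        intro i hi'
        have : pvPresum ts i ≤ pvPresum ts ((lo + hi) / 2) := pvPresum_mono ts i _ (by omega)
        omega
      · simp only [hc, if_false]
        refine ih lo ((lo + hi) / 2) (by omega) (by omega) (by omega) hlow ?_
        intro i hi1 hi2
        have : pvPresum ts ((lo + hi) / 2) ≤ pvPresum ts i := pvPresum_mono ts _ i (by omega)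
        omega
    · simp only [h, dite_false]
      exact ⟨by omega, hlow, fun i h1 h2 => hhigh i (by omega) h2⟩

theorem pvMid_nonpos (ts : List String) (b : Int) (h : b ≤ 0) : pvMid ts b = [] := by
  cases ts <;> simp [pvMid, h]

theorem pvSlice_full (t : String) (r : Int) (h0 : 0 ≤ r) (h : PySem.Str.len t ≤ r) :
    PySem.Str.slice t none (some r) = t := by
  apply String.toList_inj.mp
  rw [PySem.Str.toList_slice]
  simp only [PySem.Chars.slice_eq_listSlice]
  rw [PySem.List.slice_to _ h0]
  apply List.take_of_length_le
  rw [PySem.Str.len_eq] at h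
  omega

theorem pvLen_slice (t : String) (r : Int) (h0 : 0 ≤ r) :
    PySem.Str.len (PySem.Str.slice t none (some r)) = min (PySem.Str.len t) r := by
  rw [PySem.Str.len_eq, PySem.Str.toList_slice]
  simp only [PySem.Chars.slice_eq_listSlice]
  rw [PySem.List.slice_to _ h0]
  simp [PySem.Str.len_eq]
  omega

-- A's loop computes pvMid on the normalized list with the remaining budget
theorem pvALoop_eq_mid (texts : List (Option String)) (max_chars total : Int) :
    pvALoop texts max_chars total =
      pvMid (texts.map (fun t => t.getD "")) (max_chars - total) := by
  induction texts generalizing total with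
  | nil => simp [pvALoop, pvMid]
  | cons t0 rest ih =>
    simp only [pvALoop, List.map_cons, pvMid]
    by_cases hrem : max_chars - total ≤ 0
    · simp [hrem]
    · simp only [hrem, if_false]
      have hr0 : (0 : Int) ≤ max_chars - total := by omega
      by_cases htr : PySem.Str.len (t0.getD "") > max_chars - total
      · simp only [htr, if_true]
        congr 1
        rw [ih]
        have hlen : PySem.Str.len (PySem.Str.slice (t0.getD "") none (some (max_chars - total)))
            = max_chars - total := by
          rw [pvLen_slice _ _ hr0]; omega
        rw [hlen]
        rw [pvMid_nonpos _ _ (by omega), pvMid_nonpos _ _ (by omega)]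
      · simp only [htr, if_false]
        rw [pvSlice_full _ _ hr0 (by omega)]
        congr 1
        rw [ih]
        congr 1
        omega

-- B's mapped range computes pvMid, given the bisect characterization of r
theorem pvMapRange_eq_mid (ts : List String) (mc : Int) (r : Nat)
    (hrn : r ≤ ts.length)
    (hlt : ∀ i, i < r → pvPresum ts i < mc)
    (hge : ∀ i, r ≤ i → i < ts.length → mc ≤ pvPresum ts i) :
    (List.range r).map (fun i =>
        PySem.Str.slice (ts.getD i "") none (some (mc - pvPresum ts i))) = pvMid ts mc := by
  induction ts generalizing mc r with
  | nil =>
    have : r = 0 := by simpa using hrn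
    subst this
    simp [pvMid]
  | cons t rest ih =>
    cases r with
    | zero =>
      have h0 : mc ≤ pvPresum (t :: rest) 0 := hge 0 (by omega) (by simp)
      simp only [pvPresum] at h0
      simp [pvMid, show mc ≤ 0 by omega]
    | succ r' =>
      have hpos : 0 < mc := by
        have := hlt 0 (by omega); simpa [pvPresum] using this
      rw [List.range_succ_eq_map]
      simp only [List.map_cons, List.map_map]
      rw [pvMid]
      simp only [show ¬ mc ≤ 0 by omega, if_false]
      congr 1
      · simp [pvPresum]
      · rw [← ih (mc - PySem.Str.len t) r' (by simpa using hrn)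
            (fun i hi => by
              have := hlt (i + 1) (by omega)
              simp only [pvPresum] at this; omega)
            (fun i hi1 hi2 => by
              have := hge (i + 1) (by omega) (by simpa using hi2)
              simp only [pvPresum] at this; omega)]
        apply List.map_congr_left
        intro i _
        simp only [Function.comp]
        have : mc - pvPresum (t :: rest) (i + 1) = mc - PySem.Str.len t - pvPresum rest i := by
          simp only [pvPresum]; omega
        simp [pvPresum]
        ring_nf

-- ===== VERDICT (by name: the statement is the Claim_ definition above) =====
theorem enforce_context_budget_spec : Claim_equal_enforce_context_budget := by
  intro texts max_chars _
  unfold Spec_enforce_context_budget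
  unfold enforce_context_budget enforce_context_budget_alt
  by_cases h : max_chars ≤ 0
  · simp [h]
  · simp only [h, if_false]
    rw [pvALoop_eq_mid]
    simp only [sub_zero]
    have hb := pvBisect_spec (texts.map (fun t => t.getD "")) max_chars
      ((texts.map (fun t => t.getD "")).length) 0 (texts.map (fun t => t.getD "")).length
      (by omega) (by omega) (le_refl _)
      (by intro i hi; omega)
      (by intro i hi1 hi2; omega)
    obtain ⟨h1, h2, h3⟩ := hb
    rw [← pvMapRange_eq_mid (texts.map (fun t => t.getD "")) max_chars _ h1 h2 h3]
    apply List.map_congr_left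
    intro i hi
    simp only [List.mem_range] at hi
    rw [pvBPrefix_getD _ 0 i (by omega)]
    norm_num
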